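-- pv_equiv track=rewrite | github.com/01laural/info | funciones.py | validacion_alphanum_caracter
-- ===== SOURCE A (Python) =====
-- import string
--
-- def validacion_alphanum_caracter(p):
--   """
--   Esta es una descripción de valida_alphanum_caracter.
--
--   Esta función válida que la información dada por el usuario sea de caracter alfanumérico.
--   A la función se le ingresa un valor str y devuelve un valor booleano, True si el caracter es alfanumérico y
--   False si es un caracter diferente
--
--   Parámetros:
--   - x: el dato ingresado por el ususario.
--
--   Devuelve:
--   Un valor booleano(True/False).
--   """
--   abc=string.ascii_letters+'0123456789-#'
--   for letra in p:
--     if letra in abc: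
--       continue
--     else:
--       return False
--   return True
-- ===== SOURCE B (Python) =====
-- import string
--
-- def validacion_alphanum_caracter(p):
--   # Counting formulation: instead of scanning p, iterate over the allowed
--   # alphabet and count how many positions of p each allowed character covers;
--   # every character of p is allowed iff those counts sum to len(p).
--   abc = string.ascii_letters + '0123456789-#'
--   return sum(p.count(c) for c in abc) == len(p)
-- ===== Notes on version B (the rewrite author's own statement) =====
-- stated objective: alternative
-- what changed: Inverts the traversal: instead of scanning p with an early-exit membership test per character, B loops over the allowed alphabet, counts each allowed character's occurrences in p, and checks the counts sum to len(p).
import Mathlib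
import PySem

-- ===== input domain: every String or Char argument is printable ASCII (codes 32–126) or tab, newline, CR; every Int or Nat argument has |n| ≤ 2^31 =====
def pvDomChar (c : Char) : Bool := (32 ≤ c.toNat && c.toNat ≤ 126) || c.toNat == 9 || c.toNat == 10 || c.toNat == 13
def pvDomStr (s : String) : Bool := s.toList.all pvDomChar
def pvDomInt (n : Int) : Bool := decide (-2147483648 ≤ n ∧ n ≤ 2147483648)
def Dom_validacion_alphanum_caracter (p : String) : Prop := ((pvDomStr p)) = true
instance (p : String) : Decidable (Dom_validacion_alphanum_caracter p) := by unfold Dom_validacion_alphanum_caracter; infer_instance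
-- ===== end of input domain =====

-- B replaces A's early-exit scan of p by a loop over the allowed alphabet that
-- counts occurrences in p and compares the total with len(p) (objective: alternative).

-- ===== PORT A =====
-- A's early-exit scan: recurse over the characters of p, returning False at the
-- first character not in abc ('letra in abc' on a 1-char letra = membership).
def pvAbc : List Char := "abcdefghijklmnopqrstuvwxyzABCDEFGHIJKLMNOPQRSTUVWXYZ0123456789-#".toList

def pvScan : List Char → Bool
  | [] => true
  | c :: rest => if pvAbc.contains c then pvScan rest else false

def validacion_alphanum_caracter (p : String) : Bool := pvScan p.toList

-- ===== PORT B =====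
-- B: sum(p.count(c) for c in abc) == len(p)
def validacion_alphanum_caracter_alt (p : String) : Bool :=
  decide ((pvAbc.map (fun c => (p.toList.count c : Int))).sum = PySem.Str.len p)

-- ===== PRECONDITION & SPEC =====
def Spec_validacion_alphanum_caracter (p : String) (out : Bool) : Prop := out = validacion_alphanum_caracter_alt p
instance (p : String) (out : Bool) : Decidable (Spec_validacion_alphanum_caracter p out) := by unfold Spec_validacion_alphanum_caracter; infer_instance

-- ===== CLAIM (what is proved, stated in full; the proofs are below) =====
def Claim_equal_validacion_alphanum_caracter : Prop := ∀ (p : String), Dom_validacion_alphanum_caracter p → Spec_validacion_alphanum_caracter p (validacion_alphanum_caracter p)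

-- ===== LEMMAS AND PROOFS =====
theorem pvAbc_nodup : pvAbc.Nodup := by decide

theorem pvScan_eq_all (l : List Char) : pvScan l = l.all pvAbc.contains := by
  induction l with
  | nil => rfl
  | cons c rest ih => simp [pvScan, List.all_cons, ih]

-- indicator sum over the (nodup) alphabet
theorem pv_indicator_sum (x : Char) :
    (pvAbc.map (fun c => if x == c then (1 : Int) else 0)).sum
      = if pvAbc.contains x then (1 : Int) else 0 := by
  rw [PySem.List.sum_map_ite_one_zero]
  have hcount : pvAbc.countP (fun c => x == c) = pvAbc.count x := by
    unfold List.count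
    exact List.countP_congr (fun c _ => by simp [BEq.comm])
  rw [hcount]
  by_cases h : x ∈ pvAbc
  · rw [List.count_eq_one_of_mem pvAbc_nodup h]
    simp [h]
  · rw [List.count_eq_zero_of_not_mem h]
    simp [h]

-- the alphabet-counting sum equals the number of allowed positions of l
theorem pv_sum_counts (l : List Char) :
    (pvAbc.map (fun c => (l.count c : Int))).sum
      = (l.countP pvAbc.contains : Int) := by
  induction l with
  | nil => simp
  | cons x rest ih =>
    have hmap : (pvAbc.map (fun c => ((x :: rest).count c : Int)))
        = pvAbc.map (fun c => (rest.count c : Int) + if x == c then (1 : Int) else 0) := by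
      apply List.map_congr_left
      intro c _
      rw [List.count_cons]
      split_ifs with h <;> simp
    rw [hmap, PySem.List.sum_map_add_int, ih, pv_indicator_sum, List.countP_cons]
    by_cases h : pvAbc.contains x <;> simp_all

-- ===== VERDICT (by name: the statement is the Claim_ definition above) =====
theorem validacion_alphanum_caracter_spec : Claim_equal_validacion_alphanum_caracter := by
  intro p _
  unfold Spec_validacion_alphanum_caracter validacion_alphanum_caracter validacion_alphanum_caracter_alt
  rw [pvScan_eq_all, pv_sum_counts, PySem.Str.len_eq, Bool.eq_iff_iff]
  simp only [List.all_eq_true, decide_eq_true_eq, Int.natCast_inj]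
  rw [List.countP_eq_length]
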